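-- pv_equiv track=rewrite | github.com/yexpp/glosario-quality-checker-and-github-activity-dashboard | glossary_checker.py | check_language_order
-- ===== SOURCE A (Python) =====
-- def format_line_info(slug, slug_lines):
--     """
--     Format the line number information for a given slug as a string for display.
--
--     Args:
--         slug (str): The slug string.
--         slug_lines (dict): Mapping from slugs to their line numbers.
--
--     Returns:
--         str: Formatted line info string ; empty string if unavailable.
--     """
--     if not slug_lines or not slug:
--         return ""
--     line = slug_lines.get(slug)
--     if line is None:
--         return ""
--     return f" (line {line})"
--
-- def iter_valid_entries(glossary):
--     """
--     Yield glossary entries that are dictionaries containing a 'slug' key.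
--
--     Args:
--         glossary (list): List of glossary entries (dicts).
--
--     Yields:
--         dict: Valid entry with a 'slug' key.
--     """
--     for entry in glossary:
--         if isinstance(entry, dict) and 'slug' in entry:
--             yield entry
--
-- def get_entry_slug_and_line(entry, slug_lines):
--     """
--     Retrieve the slug and formatted line number information for a given glossary entry.
--
--     Args:
--         entry (dict): A glossary entry dictionary expected to have a 'slug' key.
--         slug_lines (dict): Mapping of slug strings to their line numbers.
--
--     Returns:
--         tuple: (slug (str), line_info (str)) where line_info is formatted like " (line X)" or empty string.
--     """
--     slug = entry.get('slug', 'missing-slug')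
--     line_info = format_line_info(slug, slug_lines)
--     return slug, line_info
--
-- def get_language_entries(entry):
--     """
--     Extract all key-value pairs from a glossary entry except the keys 'slug' and 'ref'.
--
--     Args:
--         entry (dict): A glossary entry dictionary.
--
--     Returns:
--         dict: A new dictionary excluding the 'slug' and 'ref' keys.
--     """
--     return {k: v for k, v in entry.items() if k not in {"slug", "ref"}}
--
-- def check_language_order(glossary, slug_lines=None):
--     """
--     Check if language codes in each glossary entry follow an accepted order:
--     Either fully alphabetical, or with 'en' first followed by the rest in alphabetical order.
--     """
--     issues = []
--
--     for entry in iter_valid_entries(glossary):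
--         slug, line_info = get_entry_slug_and_line(entry, slug_lines or {})
--         language_keys = list(get_language_entries(entry).keys())
--
--         sorted_all = sorted(language_keys)
--         sorted_en_first = (['en'] if 'en' in language_keys else []) + sorted(k for k in language_keys if k != 'en')
--
--         if language_keys != sorted_all and language_keys != sorted_en_first:
--             issues.append(f"Entry '{slug}'{line_info}: {language_keys}")
--
--     return issues
-- ===== SOURCE B (Python) =====
-- def _nondecreasing(ks):
--     # one linear pass over adjacent pairs, early exit
--     return all(map(str.__le__, ks, ks[1:]))
--
-- def check_language_order(glossary, slug_lines=None):
--     lines = slug_lines or {}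
--     issues = []
--     for entry in glossary:
--         if not isinstance(entry, dict) or 'slug' not in entry:
--             continue
--         keys = [k for k in entry if k != "slug" and k != "ref"]
--         if _nondecreasing(keys) or (keys and keys[0] == 'en' and _nondecreasing(keys[1:])):
--             continue
--         slug = entry['slug']
--         where = ""
--         if lines and slug:
--             ln = lines.get(slug)
--             if ln is not None:
--                 where = f" (line {ln})"
--         issues.append(f"Entry '{slug}'{where}: {keys}")
--     return issues
-- ===== Notes on version B (the rewrite author's own statement) =====
-- stated objective: alternative
-- what changed: Per entry, B decides acceptability with one early-exit linear scan over adjacent keys (non-decreasing, or 'en' first then non-decreasing) instead of building two sorted copies and comparing whole lists.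
import Mathlib
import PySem

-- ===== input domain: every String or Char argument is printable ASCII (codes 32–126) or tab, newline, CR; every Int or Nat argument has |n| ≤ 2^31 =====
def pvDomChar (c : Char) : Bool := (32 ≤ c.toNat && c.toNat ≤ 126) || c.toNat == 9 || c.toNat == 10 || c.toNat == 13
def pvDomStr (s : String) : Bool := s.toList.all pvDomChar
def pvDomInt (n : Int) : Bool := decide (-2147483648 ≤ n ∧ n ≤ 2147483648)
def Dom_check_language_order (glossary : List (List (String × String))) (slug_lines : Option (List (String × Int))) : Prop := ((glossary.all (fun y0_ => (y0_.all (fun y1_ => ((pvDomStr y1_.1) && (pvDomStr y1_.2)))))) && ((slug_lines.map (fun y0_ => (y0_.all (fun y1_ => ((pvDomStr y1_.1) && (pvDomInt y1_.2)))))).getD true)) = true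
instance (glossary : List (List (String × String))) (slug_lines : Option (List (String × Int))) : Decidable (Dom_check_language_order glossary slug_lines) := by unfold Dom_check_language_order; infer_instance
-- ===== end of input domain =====

-- ===== PORT A =====
-- B replaces A's per-entry sort-and-compare with a single early-exit linear order scan (objective: alternative).
-- Shared input decoding: each Python dict argument arrives as an association list and is decoded with
-- PySem.Dict.ofList (= dict(pairs): first-occurrence key order, last value), used identically by both ports.
-- Shared output formatting (exact on the printable-ASCII/tab/newline/CR domain): Python repr of a str / list of str.
def pvReprChar (q c : Char) : List Char :=
  if c = '\\' then ['\\', '\\']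
  else if c = q then ['\\', q]
  else if c = Char.ofNat 9 then ['\\', 't']
  else if c = Char.ofNat 10 then ['\\', 'n']
  else if c = Char.ofNat 13 then ['\\', 'r']
  else [c]

def pvReprStr (s : String) : String :=
  let cs := s.toList
  let q : Char := if cs.contains '\'' && !(cs.contains '"') then '"' else '\''
  String.ofList (q :: cs.flatMap (pvReprChar q) ++ [q])

def pvReprKeys (ks : List String) : String :=
  "[" ++ String.intercalate ", " (ks.map pvReprStr) ++ "]"

-- f"Entry '{slug}'{line_info}: {language_keys}" (both Pythons build this very string)
def pvMsg (slug lineInfo : String) (ks : List String) : String :=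
  "Entry '" ++ slug ++ "'" ++ lineInfo ++ ": " ++ pvReprKeys ks

-- A's helper format_line_info
def format_line_info (slug : String) (slug_lines : PySem.Dict String Int) : String :=
  if slug_lines.size = 0 || slug = "" then ""
  else
    match slug_lines.get? slug with
    | none => ""
    | some line => " (line " ++ PySem.Int.toStr line ++ ")"

-- A's helper get_language_entries(entry).keys(): the dict comprehension over a dict's (unique-keyed)
-- items excluding 'slug'/'ref', then its keys — exact as the filtered items' first components.
def get_language_keys (entry : PySem.Dict String String) : List String :=
  (entry.items.filter (fun p => p.1 != "slug" && p.1 != "ref")).map (·.1)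

-- the body of A's for-loop (iter_valid_entries keeps entries containing 'slug')
def pvBodyA (slug_lines : Option (List (String × Int))) (issues : List String)
    (entryL : List (String × String)) : List String :=
  let entry := PySem.Dict.ofList entryL
  if entry.contains "slug" then
    let slug := entry.getD "slug" "missing-slug"
    let line_info := format_line_info slug (PySem.Dict.ofList (slug_lines.getD []))
    let language_keys := get_language_keys entry
    let sorted_all := PySem.List.sorted language_keys (fun x => x) false
    let sorted_en_first :=
      (if "en" ∈ language_keys then ["en"] else []) ++
        PySem.List.sorted (language_keys.filter (fun k => k != "en")) (fun x => x) false
    if language_keys ≠ sorted_all ∧ language_keys ≠ sorted_en_first then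
      issues ++ [pvMsg slug line_info language_keys]
    else issues
  else issues

def check_language_order (glossary : List (List (String × String))) (slug_lines : Option (List (String × Int))) : List String :=
  glossary.foldl (pvBodyA slug_lines) []

-- ===== PORT B =====
-- _nondecreasing: one linear pass, comparing each key with the previous one
def pvNondecFrom (prev : String) : List String → Bool
  | [] => true
  | k :: t => decide (prev ≤ k) && pvNondecFrom k t

def pvNondec : List String → Bool
  | [] => true
  | k :: t => pvNondecFrom k t

-- keys and keys[0] == 'en' and _nondecreasing(keys[1:])
def pvEnFirstOk : List String → Bool
  | [] => false
  | k :: t => k == "en" && pvNondec t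

-- the body of B's loop as an Option (filterMap = loop with continue + append)
def pvBodyB (lines : PySem.Dict String Int) (entryL : List (String × String)) : Option String :=
  let entry := PySem.Dict.ofList entryL
  if entry.contains "slug" then
    let keys := entry.keys.filter (fun k => k != "slug" && k != "ref")
    if pvNondec keys || pvEnFirstOk keys then none
    else
      let slug := entry.getD "slug" ""
      let lineInfo :=
        if lines.size = 0 || slug = "" then ""
        else
          match lines.get? slug with
          | none => ""
          | some n => " (line " ++ PySem.Int.toStr n ++ ")"
      some (pvMsg slug lineInfo keys)
  else none

def check_language_order_alt (glossary : List (List (String × String))) (slug_lines : Option (List (String × Int))) : List String :=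
  let lines := PySem.Dict.ofList (slug_lines.getD [])
  glossary.filterMap (pvBodyB lines)

-- ===== PRECONDITION & SPEC =====
def Spec_check_language_order (glossary : List (List (String × String))) (slug_lines : Option (List (String × Int))) (out : List String) : Prop := out = check_language_order_alt glossary slug_lines
instance (glossary : List (List (String × String))) (slug_lines : Option (List (String × Int))) (out : List String) : Decidable (Spec_check_language_order glossary slug_lines out) := by unfold Spec_check_language_order; infer_instance

-- ===== CLAIM (what is proved, stated in full; the proofs are below) =====
def Claim_equal_check_language_order : Prop := ∀ (glossary : List (List (String × String))) (slug_lines : Option (List (String × Int))), Dom_check_language_order glossary slug_lines → Spec_check_language_order glossary slug_lines (check_language_order glossary slug_lines)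

-- ===== LEMMAS AND PROOFS =====

lemma pvNondecFrom_iff (l : List String) : ∀ p, pvNondecFrom p l = true ↔ List.IsChain (· ≤ ·) (p :: l) := by
  induction l with
  | nil => simp [pvNondecFrom]
  | cons k t ih => intro p; simp [pvNondecFrom, ih k, List.isChain_cons_cons]

lemma pvNondec_iff (l : List String) : pvNondec l = true ↔ l.Pairwise (· ≤ ·) := by
  cases l with
  | nil => simp [pvNondec]
  | cons k t => rw [pvNondec, pvNondecFrom_iff, List.isChain_iff_pairwise]

lemma pvNondec_iff_sorted (l : List String) :
    pvNondec l = true ↔ l = PySem.List.sorted l (fun x => x) false := by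
  rw [pvNondec_iff]
  constructor
  · intro h; exact (PySem.List.sorted_eq_self_of_pairwise _ _ h).symm
  · intro h; rw [h]; exact PySem.List.sorted_pairwise _ _

-- the heart of the equivalence: on a duplicate-free key list, "equals one of the two sorted lists"
-- is "non-decreasing, or en-first with non-decreasing rest"
lemma cond_iff (keys : List String) (hnd : keys.Nodup) :
    (keys = PySem.List.sorted keys (fun x => x) false ∨
      keys = (if "en" ∈ keys then ["en"] else []) ++
        PySem.List.sorted (keys.filter (fun k => k != "en")) (fun x => x) false)
    ↔ (pvNondec keys || pvEnFirstOk keys) = true := by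
  cases keys with
  | nil => simp [pvNondec, pvEnFirstOk, PySem.List.sorted]
  | cons k t =>
    by_cases hk : k = "en"
    · subst hk
      have hent : "en" ∉ t := (List.nodup_cons.mp hnd).1
      have hfilt : ("en" :: t).filter (fun k => k != "en") = t := by
        rw [List.filter_cons]
        simp only [bne_self_eq_false, Bool.false_eq_true, if_false]
        exact List.filter_eq_self.mpr (fun x hx => bne_iff_ne.mpr (fun h => hent (h ▸ hx)))
      rw [if_pos List.mem_cons_self, hfilt]
      simp only [List.cons_append, List.nil_append, List.cons.injEq, true_and,
        ← pvNondec_iff_sorted]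
      simp [pvEnFirstOk]
    · by_cases hmem : "en" ∈ k :: t
      · rw [if_pos hmem]
        have h2 : pvEnFirstOk (k :: t) = false := by simp [pvEnFirstOk, hk]
        simp only [List.cons_append, List.nil_append, List.cons.injEq,
          ← pvNondec_iff_sorted]
        simp [hk, h2]
      · rw [if_neg hmem]
        have hfilt : (k :: t).filter (fun k => k != "en") = k :: t :=
          List.filter_eq_self.mpr (fun x hx => bne_iff_ne.mpr (fun h => hmem (h ▸ hx)))
        have h2 : pvEnFirstOk (k :: t) = false := by simp [pvEnFirstOk, hk]
        rw [hfilt, List.nil_append, ← pvNondec_iff_sorted]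
        simp [h2]

lemma keys_eq (entry : PySem.Dict String String) :
    get_language_keys entry = entry.keys.filter (fun k => k != "slug" && k != "ref") := by
  rw [get_language_keys, PySem.Dict.keys, List.filter_map]
  rfl

lemma slug_eq (entry : PySem.Dict String String) (h : entry.contains "slug" = true) :
    entry.getD "slug" "missing-slug" = entry.getD "slug" "" := by
  rw [PySem.Dict.contains_eq_isSome_get?] at h
  rw [PySem.Dict.getD_eq_get?_getD, PySem.Dict.getD_eq_get?_getD]
  cases hg : entry.get? "slug" with
  | none => rw [hg] at h; simp at h
  | some v => rfl

lemma body_eq (slug_lines : Option (List (String × Int))) (issues : List String)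
    (entryL : List (String × String)) :
    pvBodyA slug_lines issues entryL =
      issues ++ (pvBodyB (PySem.Dict.ofList (slug_lines.getD [])) entryL).toList := by
  rw [pvBodyA, pvBodyB]
  by_cases hc : (PySem.Dict.ofList entryL).contains "slug" = true
  · simp only [hc, if_true]
    set entry := PySem.Dict.ofList entryL with hentry
    have hnd : entry.keys.Nodup := PySem.Dict.nodup_keys_ofList entryL
    have hkeys := keys_eq entry
    set keys := entry.keys.filter (fun k => k != "slug" && k != "ref") with hk
    have hnd2 : keys.Nodup := hnd.filter _
    have hcond := cond_iff keys hnd2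
    rw [hkeys]
    by_cases hok : (pvNondec keys || pvEnFirstOk keys) = true
    · have : ¬ (keys ≠ PySem.List.sorted keys (fun x => x) false ∧
          keys ≠ (if "en" ∈ keys then ["en"] else []) ++
            PySem.List.sorted (keys.filter (fun k => k != "en")) (fun x => x) false) := by
        rcases hcond.mpr hok with h | h
        · exact fun hc => hc.1 h
        · exact fun hc => hc.2 h
      rw [if_neg this, hok, if_pos rfl]
      simp
    · have hcond' : keys ≠ PySem.List.sorted keys (fun x => x) false ∧
          keys ≠ (if "en" ∈ keys then ["en"] else []) ++
            PySem.List.sorted (keys.filter (fun k => k != "en")) (fun x => x) false := by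
        constructor
        · intro h; exact hok (hcond.mp (Or.inl h))
        · intro h; exact hok (hcond.mp (Or.inr h))
      rw [if_pos hcond']
      rw [Bool.not_eq_true] at hok
      rw [hok, if_neg (by simp)]
      rw [slug_eq entry hc, format_line_info]
      rfl
  · simp only [Bool.not_eq_true] at hc
    simp [hc]

lemma loop_eq (slug_lines : Option (List (String × Int))) (gl : List (List (String × String))) :
    ∀ acc, gl.foldl (pvBodyA slug_lines) acc =
      acc ++ gl.filterMap (pvBodyB (PySem.Dict.ofList (slug_lines.getD []))) := by
  induction gl with
  | nil => simp
  | cons e gl ih =>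
    intro acc
    rw [List.foldl_cons, ih, body_eq, List.filterMap_cons]
    cases pvBodyB (PySem.Dict.ofList (slug_lines.getD [])) e <;> simp

-- ===== VERDICT (by name: the statement is the Claim_ definition above) =====
theorem check_language_order_spec : Claim_equal_check_language_order := by
  intro glossary slug_lines _
  unfold Spec_check_language_order check_language_order check_language_order_alt
  simpa using loop_eq slug_lines glossary []
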